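-- pv_equiv track=rewrite | github.com/robpalbrah/RedditDailyProgrammer | easy/220.py | mangle_sentence
-- ===== SOURCE A (Python) =====
-- import string
--
-- def mangle_word(word):
--     """Takes a single word and arranges it's letters in alphabetical order.
--     Leaves numbers and punctuation in place. Capital letters retain their
--     positions. Returns mangles word."""
--     if not len(word):
--         return word
--
--     # Searching for capital letters
--     capital_letters = []
--     for (index, letter) in enumerate(word):
--         if letter.isupper():
--             capital_letters.append(index)
--
--     # Searching for punctuation and numbers
--     fixed_points = []
--     for (index, letter) in enumerate(word):
--         if letter in string.punctuation:
--             fixed_points.append(index)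
--         if letter.isdigit():
--             fixed_points.append(index)
--
--     word = word.lower()
--     sorting_list = [letter for letter in word]
--
--     # Removing punctuation and numbers
--     if fixed_points:
--         for point_index in reversed(fixed_points):
--             del sorting_list[point_index]
--
--     sorting_list.sort()
--     sorting_list = [letter for letter in sorting_list]
--
--     # Adding back punctuation, numbers and capital letters
--     if fixed_points:
--         for point_index in fixed_points:
--             sorting_list.insert(point_index, word[point_index])
--
--     if capital_letters:
--         for capital_index in capital_letters:
--             sorting_list[capital_index] = sorting_list[capital_index].upper()
--
--     mangled_word = ''.join(sorting_list)
--
--     return mangled_word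
--
-- def mangle_sentence(sentence):
--     """Takes a str and puts letters in words in alphabetical
--     order. Returns mangled sentence"""
--     if ' ' in sentence:
--         sentence = sentence.split()
--         sentence = [mangle_word(word) for word in sentence]
--         mangled_sentence = ' '.join(sentence)
--     else:
--         mangled_sentence = mangle_word(sentence)
--
--     return mangled_sentence
-- ===== SOURCE B (Python) =====
-- import string
--
-- def mangle_word(word):
--     """Single reconstruction pass: sort the word's letters once, then walk the
--     original word, keeping punctuation/digits in place and re-applying the
--     original capitalisation by position."""
--     letters = iter(sorted(c.lower() for c in word
--                           if c not in string.punctuation and not c.isdigit()))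
--     out = []
--     for c in word:
--         if c in string.punctuation or c.isdigit():
--             out.append(c)
--         else:
--             nc = next(letters)
--             out.append(nc.upper() if c.isupper() else nc)
--     return ''.join(out)
--
-- def mangle_sentence(sentence):
--     """Takes a str and puts letters in words in alphabetical
--     order. Returns mangled sentence"""
--     if ' ' in sentence:
--         return ' '.join(mangle_word(word) for word in sentence.split())
--     return mangle_word(sentence)
-- ===== Notes on version B (the rewrite author's own statement) =====
-- stated objective: simpler
-- what changed: A builds the index lists of capitals and punctuation/digits, deletes the fixed positions back-to-front from the lowered word, sorts, re-inserts the fixed characters by absolute index and then patches the capital positions; B sorts the word's letters once and rebuilds the word in a single left-to-right pass, emitting fixed characters in place and taking the next sorted letter (upper-cased iff the original position was upper-case) otherwise.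
import Mathlib
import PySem

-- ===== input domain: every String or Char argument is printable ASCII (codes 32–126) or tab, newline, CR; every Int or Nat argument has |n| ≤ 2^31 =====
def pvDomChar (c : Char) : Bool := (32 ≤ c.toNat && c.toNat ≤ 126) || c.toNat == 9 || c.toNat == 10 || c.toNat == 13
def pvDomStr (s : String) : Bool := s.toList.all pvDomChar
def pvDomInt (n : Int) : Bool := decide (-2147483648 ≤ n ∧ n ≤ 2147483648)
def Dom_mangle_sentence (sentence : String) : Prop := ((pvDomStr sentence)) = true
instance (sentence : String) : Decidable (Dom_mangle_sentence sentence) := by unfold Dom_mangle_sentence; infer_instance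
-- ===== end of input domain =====

-- B replaces A's delete/sort/reinsert/patch pipeline over absolute indices by one sort of the
-- letters followed by a single left-to-right reconstruction pass (objective: simpler).

-- ===== PORT A =====

-- string.punctuation
def pvPunct : List Char := "!\"#$%&'()*+,-./:;<=>?@[\\]^_`{|}~".toList

-- literal port of mangle_word (on code points; `letter in string.punctuation` for a single
-- character is membership; `del sl[i]` / `word[i]` / `sl[i] = v` use indices produced by
-- enumerate, hence nonnegative and in range, so eraseIdx/pyGetD/pySetD are exact here)
def mangle_word_A (word : List Char) : List Char :=
  if word.length = 0 then word
  else
    let capital_letters : List Int :=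
      (PySem.List.enumerate word 0).foldl
        (fun acc p => if PySem.Chars.isupper p.2 then acc ++ [p.1] else acc) []
    let fixed_points : List Int :=
      (PySem.List.enumerate word 0).foldl
        (fun acc p =>
          let acc := if pvPunct.contains p.2 then acc ++ [p.1] else acc
          if PySem.Chars.isdigit p.2 then acc ++ [p.1] else acc) []
    let word := PySem.Chars.lower word
    let sorting_list := word.map (fun letter => letter)
    let sorting_list :=
      if fixed_points ≠ [] then
        fixed_points.reverse.foldl (fun sl i => sl.eraseIdx i.toNat) sorting_list
      else sorting_list
    let sorting_list := PySem.List.sorted sorting_list (fun c => c) false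
    let sorting_list := sorting_list.map (fun letter => letter)
    let sorting_list :=
      if fixed_points ≠ [] then
        fixed_points.foldl
          (fun sl i => PySem.List.insert sl i (PySem.List.pyGetD word i ' ')) sorting_list
      else sorting_list
    let sorting_list :=
      if capital_letters ≠ [] then
        capital_letters.foldl
          (fun sl i =>
            PySem.List.pySetD sl i (PySem.Chars.upperChar (PySem.List.pyGetD sl i ' ')))
          sorting_list
      else sorting_list
    sorting_list

def mangle_sentence (sentence : String) : String :=
  if PySem.Str.isIn " " sentence then
    let ws := PySem.Str.split₀ sentence
    let ws := ws.map (fun w => String.ofList (mangle_word_A w.toList))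
    PySem.Str.join " " ws
  else String.ofList (mangle_word_A sentence.toList)

-- ===== PORT B =====

def pvFixed (c : Char) : Bool := pvPunct.contains c || PySem.Chars.isdigit c

-- the reconstruction pass: `for c in word: …` consuming the sorted letters with next()
-- ([]-case of the iterator is unreachable: letters holds one entry per non-fixed character)
def mangle_word_go : List Char → List Char → List Char
  | [], _ => []
  | c :: rest, letters =>
    if pvFixed c then c :: mangle_word_go rest letters
    else
      match letters with
      | [] => []
      | x :: ls =>
        (if PySem.Chars.isupper c then PySem.Chars.upperChar x else x) :: mangle_word_go rest ls

def mangle_word_B (word : List Char) : List Char :=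
  let letters :=
    PySem.List.sorted ((word.filter (fun c => !pvFixed c)).map PySem.Chars.lowerChar)
      (fun c => c) false
  mangle_word_go word letters

def mangle_sentence_alt (sentence : String) : String :=
  if PySem.Str.isIn " " sentence then
    PySem.Str.join " "
      ((PySem.Str.split₀ sentence).map (fun w => String.ofList (mangle_word_B w.toList)))
  else String.ofList (mangle_word_B sentence.toList)

-- ===== PRECONDITION & SPEC =====
def Spec_mangle_sentence (sentence : String) (out : String) : Prop := out = mangle_sentence_alt sentence
instance (sentence : String) (out : String) : Decidable (Spec_mangle_sentence sentence out) := by unfold Spec_mangle_sentence; infer_instance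

-- ===== CLAIM (what is proved, stated in full; the proofs are below) =====
def Claim_equal_mangle_sentence : Prop := ∀ (sentence : String), Dom_mangle_sentence sentence → Spec_mangle_sentence sentence (mangle_sentence sentence)

-- ===== LEMMAS AND PROOFS =====

-- character-class facts
lemma punct_all : pvPunct.all
    (fun c => !PySem.Chars.isdigit c && !PySem.Chars.isupper c
      && (PySem.Chars.lowerChar c == c)) = true := by decide

lemma punct_facts : ∀ c ∈ pvPunct,
    PySem.Chars.isdigit c = false ∧ PySem.Chars.isupper c = false ∧
      PySem.Chars.lowerChar c = c := by
  intro c hc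
  have := List.all_eq_true.mp punct_all c hc
  simp only [Bool.and_eq_true, Bool.not_eq_true', beq_iff_eq] at this
  exact ⟨this.1.1, this.1.2, this.2⟩

lemma digit_not_upper {c : Char} (h : PySem.Chars.isdigit c = true) :
    PySem.Chars.isupper c = false := by
  simp only [PySem.Chars.isdigit, Bool.and_eq_true, decide_eq_true_eq] at h
  simp only [PySem.Chars.isupper, Bool.and_eq_false_iff, decide_eq_false_iff_not]
  left
  intro hA
  exact absurd (le_trans hA h.2) (by decide)

lemma fixed_not_upper {c : Char} (h : pvFixed c = true) : PySem.Chars.isupper c = false := by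
  rcases Bool.or_eq_true_iff.mp h with hp | hd
  · exact (punct_facts c (by simp at hp; exact hp)).2.1
  · exact digit_not_upper hd

lemma fixed_lower {c : Char} (h : pvFixed c = true) : PySem.Chars.lowerChar c = c := by
  rcases Bool.or_eq_true_iff.mp h with hp | hd
  · exact (punct_facts c (by simpa using hp)).2.2
  · simp [PySem.Chars.lowerChar, digit_not_upper hd]

-- positions (as Nats, ascending) at which p holds
def idxsP (p : Char → Bool) : List Char → List Nat
  | [] => []
  | c :: rest => (if p c then [0] else []) ++ (idxsP p rest).map (· + 1)

-- unconditional pointwise facts about the Python list primitives at a successor index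
lemma ins_unc (sl : List Char) (n : Nat) (v : Char) :
    PySem.List.insert sl (n : Int) v = sl.take n ++ v :: sl.drop n := by
  by_cases h : n ≤ sl.length
  · rw [PySem.List.insert_natCast _ _ _ h]
  · have h3 : ¬ ((n : Int) < 0) := by omega
    simp only [PySem.List.insert, PySem.List.sliceIndices, h3, if_false]
    rw [List.take_of_length_le (by simp; omega), List.take_of_length_le (by omega),
        List.drop_of_length_le (by simp; omega), List.drop_of_length_le (by omega)]

lemma ins_succ (x : Char) (sl : List Char) (n : Nat) (v : Char) :
    PySem.List.insert (x :: sl) ((n : Int) + 1) v = x :: PySem.List.insert sl (n : Int) v := by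
  have h1 : ((n : Int) + 1) = ((n + 1 : Nat) : Int) := by push_cast; ring
  rw [h1, ins_unc, ins_unc]; simp

lemma pyGetD_succ (x : Char) (sl : List Char) (n : Nat) (d : Char) :
    PySem.List.pyGetD (x :: sl) ((n : Int) + 1) d = PySem.List.pyGetD sl (n : Int) d := by
  have h1 : ((n : Int) + 1) = ((n + 1 : Nat) : Int) := by push_cast; ring
  rw [h1, PySem.List.pyGetD_natCast, PySem.List.pyGetD_natCast]; simp

lemma pySetD_succ (x : Char) (sl : List Char) (n : Nat) (v : Char) :
    PySem.List.pySetD (x :: sl) ((n : Int) + 1) v = x :: PySem.List.pySetD sl (n : Int) v := by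
  have h1 : ((n : Int) + 1) = ((n + 1 : Nat) : Int) := by push_cast; ring
  rw [h1, PySem.List.pySetD_natCast, PySem.List.pySetD_natCast]; simp

lemma pyGetD_zero (x : Char) (sl : List Char) (d : Char) :
    PySem.List.pyGetD (x :: sl) 0 d = x := by
  have h := PySem.List.pyGetD_natCast (x :: sl) 0 d
  simp only [Nat.cast_zero] at h
  simp [h]

lemma pySetD_zero (x : Char) (sl : List Char) (v : Char) :
    PySem.List.pySetD (x :: sl) 0 v = v :: sl := by
  have := PySem.List.pySetD_natCast (x :: sl) 0 v; simpa using this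

-- the fold bodies of A's two index loops, over Nat indices
def insF (w : List Char) (t : List Char) (i : Nat) : List Char :=
  PySem.List.insert t (i : Int) (PySem.List.pyGetD (PySem.Chars.lower w) (i : Int) ' ')

def capsF (t : List Char) (i : Nat) : List Char :=
  PySem.List.pySetD t (i : Int) (PySem.Chars.upperChar (PySem.List.pyGetD t (i : Int) ' '))

-- shift lemmas: folding over indices shifted by one past a fixed head
lemma foldl_erase_shift (is : List Nat) (x : Char) :
    ∀ sl : List Char, (is.map (· + 1)).foldl (fun t i => t.eraseIdx i) (x :: sl)
      = x :: is.foldl (fun t i => t.eraseIdx i) sl := by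
  induction is with
  | nil => intro sl; simp
  | cons i is ih => intro sl; simp only [List.map_cons, List.foldl_cons, List.eraseIdx_cons_succ, ih]

lemma foldl_ins_shift (f : Nat → Char) (is : List Nat) (x : Char) :
    ∀ sl : List Char,
      (is.map (· + 1)).foldl (fun t (i : Nat) => PySem.List.insert t (i : Int) (f i)) (x :: sl)
        = x :: is.foldl (fun t (i : Nat) => PySem.List.insert t (i : Int) (f (i + 1))) sl := by
  induction is with
  | nil => intro sl; simp
  | cons i is ih =>
    intro sl
    simp only [List.map_cons, List.foldl_cons]
    rw [show ((i + 1 : Nat) : Int) = ((i : Int) + 1) by push_cast; ring, ins_succ, ih]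

lemma foldl_caps_shift (is : List Nat) (x : Char) :
    ∀ sl : List Char, (is.map (· + 1)).foldl capsF (x :: sl) = x :: is.foldl capsF sl := by
  induction is with
  | nil => intro sl; simp
  | cons i is ih =>
    intro sl
    simp only [List.map_cons, List.foldl_cons, capsF]
    rw [show ((i + 1 : Nat) : Int) = ((i : Int) + 1) by push_cast; ring, pyGetD_succ, pySetD_succ,
        ih]

-- the enumerate/append loops of A collect exactly the positions of their predicate
lemma enum_filter_fold (q : Char → Bool) (w : List Char) :
    ∀ (s : Int) (acc : List Int),
      (PySem.List.enumerate w s).foldl (fun acc p => if q p.2 then acc ++ [p.1] else acc) acc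
        = acc ++ (idxsP q w).map (fun (n : Nat) => s + (n : Int)) := by
  induction w with
  | nil => intro s acc; simp [PySem.List.enumerate, idxsP]
  | cons c rest ih =>
    intro s acc
    rw [PySem.List.enumerate_cons]
    simp only [List.foldl_cons]
    have hmap : (idxsP q rest).map (fun (n : Nat) => s + ((n + 1 : Nat) : Int))
        = (idxsP q rest).map (fun (n : Nat) => (s + 1) + (n : Int)) :=
      List.map_congr_left fun n _ => by push_cast; ring
    by_cases hq : q c
    · rw [if_pos hq, ih (s + 1) (acc ++ [s])]
      simp only [idxsP, hq, if_pos, List.map_append, List.map_map, Function.comp_def,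
        List.append_assoc]
      simp
      intro a _
      ring
    · rw [if_neg hq, ih (s + 1) acc]
      simp only [idxsP, hq, Bool.false_eq_true, if_false, List.nil_append, List.map_map,
        Function.comp_def]
      simp
      intro a _
      ring

-- A's fixed-points loop body (punctuation test then digit test) is one test of pvFixed
lemma fixed_body_eq :
    (fun (acc : List Int) (p : Int × Char) =>
        let acc := if pvPunct.contains p.2 then acc ++ [p.1] else acc
        if PySem.Chars.isdigit p.2 then acc ++ [p.1] else acc)
      = (fun acc p => if pvFixed p.2 then acc ++ [p.1] else acc) := by
  funext acc p
  by_cases hp : pvPunct.contains p.2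
  · have hd : PySem.Chars.isdigit p.2 = false := (punct_facts p.2 (by simpa using hp)).1
    simp [hd, pvFixed]
  · have hp' : p.2 ∉ pvPunct := by simpa using hp
    by_cases hd : PySem.Chars.isdigit p.2 <;> simp [hp', hd, pvFixed]

-- deleting the fixed positions (back to front) from the lowered word leaves its letters
lemma erase_eq (w : List Char) :
    (idxsP pvFixed w).reverse.foldl (fun t i => t.eraseIdx i) (PySem.Chars.lower w)
      = (w.filter (fun c => !pvFixed c)).map PySem.Chars.lowerChar := by
  induction w with
  | nil => simp [idxsP, PySem.Chars.lower]
  | cons c rest ih =>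
    have hl : PySem.Chars.lower (c :: rest) = PySem.Chars.lowerChar c :: PySem.Chars.lower rest := by
      simp [PySem.Chars.lower]
    by_cases hf : pvFixed c
    · have h1 : idxsP pvFixed (c :: rest) = 0 :: (idxsP pvFixed rest).map (· + 1) := by
        simp [idxsP, hf]
      have h2 : (0 :: (idxsP pvFixed rest).map (· + 1)).reverse
          = (idxsP pvFixed rest).reverse.map (· + 1) ++ [0] := by
        simp [← List.map_reverse]
      rw [h1, hl, h2, List.foldl_append, foldl_erase_shift, ih]
      simp [hf]
    · have h1 : idxsP pvFixed (c :: rest) = (idxsP pvFixed rest).map (· + 1) := by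
        simp [idxsP, hf]
      rw [h1, hl, ← List.map_reverse, foldl_erase_shift, ih]
      simp [hf]

-- the reinsertion loop followed by the capitalisation loop IS B's reconstruction pass
lemma main_fold (w : List Char) :
    ∀ L : List Char, L.length = (w.filter (fun c => !pvFixed c)).length →
      (idxsP PySem.Chars.isupper w).foldl capsF ((idxsP pvFixed w).foldl (insF w) L)
        = mangle_word_go w L := by
  induction w with
  | nil =>
    intro L hL
    have : L = [] := List.eq_nil_of_length_eq_zero (by simpa using hL)
    simp [this, idxsP, mangle_word_go]
  | cons c rest ih =>
    intro L hL
    have hlow : PySem.Chars.lower (c :: rest) = PySem.Chars.lowerChar c :: PySem.Chars.lower rest := by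
      simp [PySem.Chars.lower]
    have e1 : insF (c :: rest) = fun t (i : Nat) =>
        PySem.List.insert t (i : Int)
          (PySem.List.pyGetD (PySem.Chars.lower (c :: rest)) (i : Int) ' ') := rfl
    have e2 : (fun t (i : Nat) => PySem.List.insert t (i : Int)
          (PySem.List.pyGetD (PySem.Chars.lower (c :: rest)) (((i + 1 : Nat)) : Int) ' '))
        = insF rest := by
      funext t i
      simp only [insF]
      rw [hlow, show ((i + 1 : Nat) : Int) = ((i : Int) + 1) by push_cast; ring, pyGetD_succ]
    have hins : ∀ (x : Char) (sl : List Char),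
        ((idxsP pvFixed rest).map (· + 1)).foldl (insF (c :: rest)) (x :: sl)
          = x :: (idxsP pvFixed rest).foldl (insF rest) sl := by
      intro x sl
      rw [e1, foldl_ins_shift
        (fun i => PySem.List.pyGetD (PySem.Chars.lower (c :: rest)) (i : Int) ' '), e2]
    by_cases hf : pvFixed c
    · have hup : PySem.Chars.isupper c = false := fixed_not_upper hf
      have hIF : idxsP pvFixed (c :: rest) = 0 :: (idxsP pvFixed rest).map (· + 1) := by
        simp [idxsP, hf]
      have hIU : idxsP PySem.Chars.isupper (c :: rest)
          = (idxsP PySem.Chars.isupper rest).map (· + 1) := by simp [idxsP, hup]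
      have h0 : insF (c :: rest) L 0 = c :: L := by
        simp only [insF, hlow, Nat.cast_zero]
        rw [pyGetD_zero, PySem.List.insert_zero, fixed_lower hf]
      rw [hIF, hIU, List.foldl_cons, h0, hins, foldl_caps_shift,
        ih L (by simpa [hf] using hL)]
      simp [mangle_word_go, hf]
    · rcases L with _ | ⟨x, ls⟩
      · exfalso; simp [hf] at hL
      have hlen : ls.length = (rest.filter (fun c => !pvFixed c)).length := by
        simpa [hf] using hL
      have hIF : idxsP pvFixed (c :: rest) = (idxsP pvFixed rest).map (· + 1) := by
        simp [idxsP, hf]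
      rw [hIF, hins]
      by_cases hup : PySem.Chars.isupper c
      · have hIU : idxsP PySem.Chars.isupper (c :: rest)
            = 0 :: (idxsP PySem.Chars.isupper rest).map (· + 1) := by simp [idxsP, hup]
        have h0 : capsF (x :: (idxsP pvFixed rest).foldl (insF rest) ls) 0
            = PySem.Chars.upperChar x :: (idxsP pvFixed rest).foldl (insF rest) ls := by
          simp only [capsF, Nat.cast_zero]
          rw [pyGetD_zero, pySetD_zero]
        rw [hIU, List.foldl_cons, h0, foldl_caps_shift, ih ls hlen]
        simp [mangle_word_go, hf, hup]
      · have hIU : idxsP PySem.Chars.isupper (c :: rest)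
            = (idxsP PySem.Chars.isupper rest).map (· + 1) := by simp [idxsP, hup]
        rw [hIU, foldl_caps_shift, ih ls hlen]
        simp [mangle_word_go, hf, hup]

lemma foldl_guard {α β : Type} (l : List β) (f : α → β → α) (b : α) :
    (if l ≠ [] then l.foldl f b else b) = l.foldl f b := by
  rcases l with _ | _ <;> simp

lemma foldl_guard_rev {α β : Type} (l : List β) (f : α → β → α) (b : α) :
    (if l ≠ [] then l.reverse.foldl f b else b) = l.reverse.foldl f b := by
  rcases l with _ | _ <;> simp

lemma castfold_erase (is : List Nat) (b : List Char) :
    ((is.map (fun (n : Nat) => (n : Int))).reverse).foldl (fun sl i => sl.eraseIdx i.toNat) b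
      = is.reverse.foldl (fun t i => t.eraseIdx i) b := by
  rw [← List.map_reverse, List.foldl_map]
  simp

lemma castfold_ins (w : List Char) (is : List Nat) (b : List Char) :
    (is.map (fun (n : Nat) => (n : Int))).foldl
        (fun sl i => PySem.List.insert sl i (PySem.List.pyGetD (PySem.Chars.lower w) i ' ')) b
      = is.foldl (insF w) b := by
  rw [List.foldl_map]; rfl

lemma castfold_caps (is : List Nat) (b : List Char) :
    (is.map (fun (n : Nat) => (n : Int))).foldl
        (fun sl i => PySem.List.pySetD sl i (PySem.Chars.upperChar (PySem.List.pyGetD sl i ' '))) b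
      = is.foldl capsF b := by
  rw [List.foldl_map]; rfl

lemma word_eq (w : List Char) : mangle_word_A w = mangle_word_B w := by
  by_cases h0 : w.length = 0
  · have : w = [] := List.eq_nil_of_length_eq_zero h0
    simp [this, mangle_word_A, mangle_word_B, mangle_word_go]
  · unfold mangle_word_A mangle_word_B
    rw [if_neg h0]
    rw [fixed_body_eq, enum_filter_fold, enum_filter_fold]
    simp only [List.nil_append, zero_add, foldl_guard, foldl_guard_rev, List.map_id']
    rw [castfold_erase, castfold_ins, castfold_caps, erase_eq]
    refine main_fold w _ ?_
    rw [PySem.List.length_sorted, List.length_map]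



-- ===== VERDICT (by name: the statement is the Claim_ definition above) =====
theorem mangle_sentence_spec : Claim_equal_mangle_sentence := by
  intro s _
  unfold Spec_mangle_sentence mangle_sentence mangle_sentence_alt
  by_cases h : PySem.Str.isIn " " s = true <;> simp only [h, if_true, Bool.false_eq_true,
    if_false, word_eq]
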